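-- pv_equiv track=rewrite | github.com/NicolasWarlop/AdventOfCode2017 | Day 03/2017d3.py | get_cartesian_coordinates
-- ===== SOURCE A (Python) =====
-- def get_direction():
--     """Returns the next direction modifier"""
--     current_dir = 0
--     direction = [(1, 0), (0, 1), (-1, 0), (0, -1)]
--     while True:
--         yield direction[current_dir%len(direction)]
--         current_dir += 1
--
-- def get_cartesian_coordinates(steps):
--     """get the x,y coordinates for a given input """
--     current_x = 0
--     current_y = 0
--     next_dir = get_direction()
--     cur_dir = next(next_dir)
--     vector_length = 1
--     length_counter = 0
--     steps_taken = 0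
--     for _ in range(1, steps):
--         current_x += cur_dir[0]
--         current_y += cur_dir[1]
--         steps_taken += 1
--         #are we at the tip of the vector?
--         if steps_taken == vector_length:
--             cur_dir = next(next_dir)
--             steps_taken = 0
--             length_counter += 1
--             #do we need to increase the vector length?
--             if length_counter % 2 == 0:
--                 vector_length += 1
--     return (current_x, current_y)
-- ===== SOURCE B (Python) =====
-- def get_cartesian_coordinates(steps):
--     """get the x,y coordinates for a given input """
--     m = steps - 1
--     if m <= 0:
--         return (0, 0)
--     # ring r: smallest r >= 1 with (2r+1)^2 - 1 >= m
--     r = 1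
--     while (2 * r + 1) ** 2 - 1 < m:
--         r += 1
--     t = m - ((2 * r - 1) ** 2 - 1)   # 1 <= t <= 8r: position along ring r
--     if t <= 2 * r:
--         return (r, t - r)
--     if t <= 4 * r:
--         return (3 * r - t, r)
--     if t <= 6 * r:
--         return (-r, 5 * r - t)
--     return (t - 7 * r, -r)
-- ===== Notes on version B (the rewrite author's own statement) =====
-- stated objective: faster
-- what changed: B replaces A's step-by-step spiral walk (one loop iteration per cell) by ring arithmetic: it finds the spiral ring r with a short search loop and computes the coordinates from the offset along the ring in closed form.
import Mathlib
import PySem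

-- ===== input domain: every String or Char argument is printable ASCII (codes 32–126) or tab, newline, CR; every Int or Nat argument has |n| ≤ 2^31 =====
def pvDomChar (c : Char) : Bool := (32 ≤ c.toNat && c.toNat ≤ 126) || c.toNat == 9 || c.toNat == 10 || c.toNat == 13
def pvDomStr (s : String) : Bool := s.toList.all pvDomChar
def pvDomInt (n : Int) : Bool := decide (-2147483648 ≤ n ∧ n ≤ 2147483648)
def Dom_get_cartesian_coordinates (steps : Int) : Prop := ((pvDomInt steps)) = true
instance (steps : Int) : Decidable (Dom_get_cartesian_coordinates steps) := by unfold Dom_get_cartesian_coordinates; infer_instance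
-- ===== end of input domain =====

-- B replaces A's cell-by-cell spiral walk by ring arithmetic: a short search for the ring plus a closed-form offset computation (objective: faster).

-- ===== PORT A =====
-- the generator get_direction: the k-th call to next() (k = 0, 1, …) returns direction[k % 4]
def pvDirAt (g : Int) : Int × Int :=
  if g % 4 = 0 then (1, 0)
  else if g % 4 = 1 then (0, 1)
  else if g % 4 = 2 then (-1, 0)
  else (0, -1)

-- loop body; state: (current_x, current_y, cur_dir, generator counter, vector_length, length_counter, steps_taken)
def pvStepA (st : Int × Int × (Int × Int) × Int × Int × Int × Int) :
    Int × Int × (Int × Int) × Int × Int × Int × Int :=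
  let (x, y, d, g, vl, lc, tk) := st
  let x := x + d.1
  let y := y + d.2
  let tk := tk + 1
  if tk = vl then
    let d := pvDirAt g
    let g := g + 1
    let tk := (0 : Int)
    let lc := lc + 1
    if lc % 2 = 0 then (x, y, d, g, vl + 1, lc, tk)
    else (x, y, d, g, vl, lc, tk)
  else (x, y, d, g, vl, lc, tk)

def get_cartesian_coordinates (steps : Int) : List Int :=
  -- cur_dir = next(next_dir) has consumed generator index 0; the counter is now 1
  let st := (PySem.List.pyRange 1 steps 1).foldl
    (fun st _ => pvStepA st)
    ((0 : Int), (0 : Int), pvDirAt 0, (1 : Int), (1 : Int), (0 : Int), (0 : Int))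
  [st.1, st.2.1]

-- ===== PORT B =====
-- while (2*r+1)**2 - 1 < m: r += 1
def pvFindR (m : Nat) (r : Nat) : Nat :=
  if (2 * r + 1) ^ 2 - 1 < m then pvFindR m (r + 1) else r
termination_by m - r
decreasing_by
  have hsq : (2 * r + 1) ^ 2 = 4 * (r * r) + 4 * r + 1 := by ring
  omega

def get_cartesian_coordinates_alt (steps : Int) : List Int :=
  if steps - 1 ≤ 0 then [0, 0]
  else
    let m : Nat := (steps - 1).toNat
    let r : Int := (pvFindR m 1 : Int)
    let t : Int := (m : Int) - ((2 * r - 1) ^ 2 - 1)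
    if t ≤ 2 * r then [r, t - r]
    else if t ≤ 4 * r then [3 * r - t, r]
    else if t ≤ 6 * r then [-r, 5 * r - t]
    else [t - 7 * r, -r]

-- ===== PRECONDITION & SPEC =====
def Spec_get_cartesian_coordinates (steps : Int) (out : List Int) : Prop := out = get_cartesian_coordinates_alt steps
instance (steps : Int) (out : List Int) : Decidable (Spec_get_cartesian_coordinates steps out) := by unfold Spec_get_cartesian_coordinates; infer_instance

-- ===== CLAIM (what is proved, stated in full; the proofs are below) =====
def Claim_equal_get_cartesian_coordinates : Prop := ∀ (steps : Int), Dom_get_cartesian_coordinates steps → Spec_get_cartesian_coordinates steps (get_cartesian_coordinates steps)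

-- ===== LEMMAS AND PROOFS =====

-- model: the walk decomposed into straight segments; segment c (c = 0, 1, …) has length c/2+1 and direction c%4
def pvDirV : Nat → Int × Int
  | 0 => (1, 0)
  | 1 => (0, 1)
  | 2 => (-1, 0)
  | _ => (0, -1)

def pvSegLen (c : Nat) : Nat := c / 2 + 1

def pvTotalLen : Nat → Nat
  | 0 => 0
  | c + 1 => pvTotalLen c + pvSegLen c

def pvSegStart : Nat → Int × Int
  | 0 => (0, 0)
  | c + 1 =>
    ((pvSegStart c).1 + (pvSegLen c : Int) * (pvDirV (c % 4)).1,
     (pvSegStart c).2 + (pvSegLen c : Int) * (pvDirV (c % 4)).2)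

-- the full A-loop state after pvTotalLen c + s moves (s steps into segment c)
def pvMkState (c s : Nat) : Int × Int × (Int × Int) × Int × Int × Int × Int :=
  ((pvSegStart c).1 + (s : Int) * (pvDirV (c % 4)).1,
   (pvSegStart c).2 + (s : Int) * (pvDirV (c % 4)).2,
   pvDirV (c % 4), (c : Int) + 1, (pvSegLen c : Int), (c : Int), (s : Int))

theorem pvDirAt_cast (c : Nat) : pvDirAt (c : Int) = pvDirV (c % 4) := by
  have h : ((c : Int)) % 4 = ((c % 4 : Nat) : Int) := by omega
  have h4 : c % 4 < 4 := Nat.mod_lt _ (by norm_num)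
  unfold pvDirAt pvDirV
  interval_cases h' : c % 4 <;> simp_all

theorem pvStepA_interior (c s : Nat) (h : s + 1 < pvSegLen c) :
    pvStepA (pvMkState c s) = pvMkState c (s + 1) := by
  unfold pvStepA pvMkState
  have hne : (s : Int) + 1 ≠ (pvSegLen c : Int) := by exact_mod_cast Nat.ne_of_lt h
  simp only [if_neg hne]
  push_cast
  ring_nf

theorem pvSegStart_succ (c : Nat) :
    pvSegStart (c + 1) =
      ((pvSegStart c).1 + (pvSegLen c : Int) * (pvDirV (c % 4)).1,
       (pvSegStart c).2 + (pvSegLen c : Int) * (pvDirV (c % 4)).2) := rfl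

theorem pvStepA_boundary (c s : Nat) (h : s + 1 = pvSegLen c) :
    pvStepA (pvMkState c s) = pvMkState (c + 1) 0 := by
  unfold pvStepA pvMkState
  have heq : (s : Int) + 1 = (pvSegLen c : Int) := by exact_mod_cast h
  simp only [heq]
  have hd : pvDirAt ((c : Int) + 1) = pvDirV ((c + 1) % 4) := by
    have := pvDirAt_cast (c + 1); push_cast at this; exact this
  have hstart1 : (pvSegStart (c + 1)).1 = (pvSegStart c).1 + (pvSegLen c : Int) * (pvDirV (c % 4)).1 := by
    simp [pvSegStart]
  have hstart2 : (pvSegStart (c + 1)).2 = (pvSegStart c).2 + (pvSegLen c : Int) * (pvDirV (c % 4)).2 := by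
    simp [pvSegStart]
  by_cases hpar : ((c : Int) + 1) % 2 = 0
  · have hlen : (pvSegLen (c + 1) : Int) = (pvSegLen c : Int) + 1 := by
      unfold pvSegLen; push_cast; omega
    simp only [if_pos hpar, hd, hstart1, hstart2, hlen]
    rw [← heq]
    push_cast
    ring_nf
  · have hlen : (pvSegLen (c + 1) : Int) = (pvSegLen c : Int) := by
      unfold pvSegLen; push_cast; omega
    simp only [if_neg hpar, hd, hstart1, hstart2, hlen]
    rw [← heq]
    push_cast
    ring_nf

theorem pvInvariant (m : Nat) : ∀ c s, s < pvSegLen c → m = pvTotalLen c + s →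
    pvStepA^[m]
      ((0 : Int), (0 : Int), pvDirAt 0, (1 : Int), (1 : Int), (0 : Int), (0 : Int))
      = pvMkState c s := by
  induction m with
  | zero =>
    intro c s hs hm
    have hc : c = 0 := by
      by_contra hne
      obtain ⟨c', rfl⟩ := Nat.exists_eq_succ_of_ne_zero hne
      have : 0 < pvSegLen c' := by unfold pvSegLen; omega
      simp [pvTotalLen] at hm
      omega
    subst hc
    have hs0 : s = 0 := by unfold pvSegLen at hs; omega
    subst hs0
    simp [pvMkState, pvSegStart, pvSegLen, pvDirAt, pvDirV]
  | succ m ih =>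
    intro c s hs hm
    rw [Function.iterate_succ_apply']
    cases s with
    | succ s' =>
      rw [ih c s' (by omega) (by omega), pvStepA_interior c s' hs]
    | zero =>
      cases c with
      | zero => simp [pvTotalLen] at hm
      | succ c' =>
        have hgt : 0 < pvSegLen c' := by unfold pvSegLen; omega
        have hm' : m = pvTotalLen c' + (pvSegLen c' - 1) := by simp [pvTotalLen] at hm; omega
        rw [ih c' (pvSegLen c' - 1) (by omega) hm',
          pvStepA_boundary c' (pvSegLen c' - 1) (by omega)]

theorem pvDecomp (n : Nat) : ∃ c s, s < pvSegLen c ∧ n = pvTotalLen c + s := by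
  induction n with
  | zero => exact ⟨0, 0, by simp [pvSegLen], by simp [pvTotalLen]⟩
  | succ n ih =>
    obtain ⟨c, s, hs, hn⟩ := ih
    by_cases h : s + 1 < pvSegLen c
    · exact ⟨c, s + 1, h, by omega⟩
    · exact ⟨c + 1, 0, by simp [pvSegLen], by simp [pvTotalLen]; omega⟩

theorem pvTotalLen_closed (c : Nat) : 4 * pvTotalLen c = c * c + 2 * c + c % 2 := by
  induction c with
  | zero => simp [pvTotalLen]
  | succ c ih =>
    have h : (c + 1) * (c + 1) = c * c + 2 * c + 1 := by ring
    simp only [pvTotalLen, pvSegLen]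
    omega

theorem pvSegStart_closed (q : Nat) :
    pvSegStart (4 * q + 1) = ((q : Int) + 1, -(q : Int)) ∧
    pvSegStart (4 * q + 2) = ((q : Int) + 1, (q : Int) + 1) ∧
    pvSegStart (4 * q + 3) = (-((q : Int) + 1), (q : Int) + 1) ∧
    pvSegStart (4 * q + 4) = (-((q : Int) + 1), -((q : Int) + 1)) := by
  induction q with
  | zero => refine ⟨?_, ?_, ?_, ?_⟩ <;> decide
  | succ q ih =>
    obtain ⟨h1, h2, h3, h4⟩ := ih
    have s1 : pvSegStart (4 * (q + 1) + 1) = ((q : Int) + 2, -((q : Int) + 1)) := by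
      have e : 4 * (q + 1) + 1 = (4 * q + 4) + 1 := by ring
      have hm : (4 * q + 4) % 4 = 0 := by omega
      have hl : (pvSegLen (4 * q + 4) : Int) = 2 * (q : Int) + 3 := by unfold pvSegLen; push_cast; omega
      rw [e, pvSegStart_succ, hm, hl, h4]
      simp [pvDirV, Prod.ext_iff]
      ring
    have s2 : pvSegStart (4 * (q + 1) + 2) = ((q : Int) + 2, (q : Int) + 2) := by
      have e : 4 * (q + 1) + 2 = (4 * (q + 1) + 1) + 1 := by ring
      have hm : (4 * (q + 1) + 1) % 4 = 1 := by omega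
      have hl : (pvSegLen (4 * (q + 1) + 1) : Int) = 2 * (q : Int) + 3 := by unfold pvSegLen; push_cast; omega
      rw [e, pvSegStart_succ, hm, hl, s1]
      simp [pvDirV, Prod.ext_iff]
      ring
    have s3 : pvSegStart (4 * (q + 1) + 3) = (-((q : Int) + 2), (q : Int) + 2) := by
      have e : 4 * (q + 1) + 3 = (4 * (q + 1) + 2) + 1 := by ring
      have hm : (4 * (q + 1) + 2) % 4 = 2 := by omega
      have hl : (pvSegLen (4 * (q + 1) + 2) : Int) = 2 * (q : Int) + 4 := by unfold pvSegLen; push_cast; omega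
      rw [e, pvSegStart_succ, hm, hl, s2]
      simp [pvDirV, Prod.ext_iff]
      ring
    have s4 : pvSegStart (4 * (q + 1) + 4) = (-((q : Int) + 2), -((q : Int) + 2)) := by
      have e : 4 * (q + 1) + 4 = (4 * (q + 1) + 3) + 1 := by ring
      have hm : (4 * (q + 1) + 3) % 4 = 3 := by omega
      have hl : (pvSegLen (4 * (q + 1) + 3) : Int) = 2 * (q : Int) + 4 := by unfold pvSegLen; push_cast; omega
      rw [e, pvSegStart_succ, hm, hl, s3]
      simp [pvDirV, Prod.ext_iff]
      ring
    refine ⟨?_, ?_, ?_, ?_⟩ <;> push_cast [Prod.ext_iff, s1, s2, s3, s4] <;> exact ⟨by ring, by ring⟩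

theorem pvFindR_spec (m : Nat) : ∀ k r0, m ≤ (2 * (r0 + k) + 1) ^ 2 - 1 →
    (∀ r', r0 ≤ r' → r' < r0 + k → (2 * r' + 1) ^ 2 - 1 < m) →
    pvFindR m r0 = r0 + k := by
  intro k
  induction k with
  | zero =>
    intro r0 hle _
    rw [pvFindR, if_neg (Nat.not_lt.mpr (by simpa using hle))]
    omega
  | succ k ih =>
    intro r0 hle hlt
    have hcond : (2 * r0 + 1) ^ 2 - 1 < m := hlt r0 le_rfl (by omega)
    rw [pvFindR, if_pos hcond,
      ih (r0 + 1) (by rw [show r0 + 1 + k = r0 + (k + 1) from by omega]; exact hle)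
        (fun r' h1 h2 => hlt r' (by omega) (by omega))]
    omega

theorem pvAlt_eval (n R : Nat) (hn : 1 ≤ n) (hfind : pvFindR n 1 = R) :
    get_cartesian_coordinates_alt ((n : Int) + 1) =
      (if (n : Int) - ((2 * (R : Int) - 1) ^ 2 - 1) ≤ 2 * (R : Int) then
        [(R : Int), (n : Int) - ((2 * (R : Int) - 1) ^ 2 - 1) - (R : Int)]
      else if (n : Int) - ((2 * (R : Int) - 1) ^ 2 - 1) ≤ 4 * (R : Int) then
        [3 * (R : Int) - ((n : Int) - ((2 * (R : Int) - 1) ^ 2 - 1)), (R : Int)]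
      else if (n : Int) - ((2 * (R : Int) - 1) ^ 2 - 1) ≤ 6 * (R : Int) then
        [-(R : Int), 5 * (R : Int) - ((n : Int) - ((2 * (R : Int) - 1) ^ 2 - 1))]
      else [(n : Int) - ((2 * (R : Int) - 1) ^ 2 - 1) - 7 * (R : Int), -(R : Int)]) := by
  unfold get_cartesian_coordinates_alt
  rw [if_neg (by omega)]
  have hm : (((n : Int) + 1 - 1).toNat) = n := by omega
  simp only [hm, hfind]

theorem pvAlt_link (c s : Nat) (hs : s < pvSegLen c) (h1 : 1 ≤ pvTotalLen c + s) :
    get_cartesian_coordinates_alt (((pvTotalLen c + s : Nat) : Int) + 1)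
      = [(pvSegStart c).1 + (s : Int) * (pvDirV (c % 4)).1,
         (pvSegStart c).2 + (s : Int) * (pvDirV (c % 4)).2] := by
  -- c = 0 forces s = 0 and n = 0, excluded by h1
  rcases Nat.eq_zero_or_pos c with hc0 | hcpos
  · subst hc0
    unfold pvSegLen at hs
    simp [pvTotalLen] at h1
    omega
  obtain ⟨q, j, hj, rfl⟩ : ∃ q j, j < 4 ∧ c = 4 * q + 1 + j :=
    ⟨(c - 1) / 4, (c - 1) % 4, Nat.mod_lt _ (by norm_num), by omega⟩
  obtain ⟨g1, g2, g3, g4⟩ := pvSegStart_closed q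
  interval_cases j
  · rw [show 4 * q + 1 + 0 = 4 * q + 1 from by omega] at hs h1 ⊢
    -- c = 4q+1: up side, t = s+1
    have hlen : pvSegLen (4 * q + 1) = 2 * q + 1 := by unfold pvSegLen; omega
    have hT : pvTotalLen (4 * q + 1) = 4 * (q * q) + 4 * q + 1 := by
      have h4 := pvTotalLen_closed (4 * q + 1)
      have hr : (4 * q + 1) * (4 * q + 1) = 16 * (q * q) + 8 * q + 1 := by ring
      omega
    have hfind : pvFindR (pvTotalLen (4 * q + 1) + s) 1 = 1 + q := by
      apply pvFindR_spec
      · have hr : (2 * (1 + q) + 1) ^ 2 = 4 * (q * q) + 12 * q + 9 := by ring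
        omega
      · intro r' hr1 hr2
        refine Nat.lt_of_le_of_lt (Nat.sub_le_sub_right (Nat.pow_le_pow_left (show 2 * r' + 1 ≤ 2 * q + 1 by omega) 2) 1) ?_
        have hr : (2 * q + 1) ^ 2 = 4 * (q * q) + 4 * q + 1 := by ring
        omega
    rw [pvAlt_eval _ _ (by omega) hfind]
    have hm : (4 * q + 1) % 4 = 1 := by omega
    have ht : ((pvTotalLen (4 * q + 1) + s : Nat) : Int) - ((2 * ((1 + q : Nat) : Int) - 1) ^ 2 - 1) = (s : Int) + 1 := by
      push_cast [hT]; ring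
    rw [ht, hm, g1]
    rw [if_pos (by push_cast; omega)]
    simp [pvDirV, List.cons.injEq]
    constructor <;> ring
  · rw [show 4 * q + 1 + 1 = 4 * q + 2 from by omega] at hs h1 ⊢
    -- c = 4q+2: left side, t = 2r+s
    have hlen : pvSegLen (4 * q + 2) = 2 * q + 2 := by unfold pvSegLen; omega
    have hT : pvTotalLen (4 * q + 2) = 4 * (q * q) + 6 * q + 2 := by
      have h4 := pvTotalLen_closed (4 * q + 2)
      have hr : (4 * q + 2) * (4 * q + 2) = 16 * (q * q) + 16 * q + 4 := by ring
      omega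
    have hfind : pvFindR (pvTotalLen (4 * q + 2) + s) 1 = 1 + q := by
      apply pvFindR_spec
      · have hr : (2 * (1 + q) + 1) ^ 2 = 4 * (q * q) + 12 * q + 9 := by ring
        omega
      · intro r' hr1 hr2
        refine Nat.lt_of_le_of_lt (Nat.sub_le_sub_right (Nat.pow_le_pow_left (show 2 * r' + 1 ≤ 2 * q + 1 by omega) 2) 1) ?_
        have hr : (2 * q + 1) ^ 2 = 4 * (q * q) + 4 * q + 1 := by ring
        omega
    rw [pvAlt_eval _ _ (by omega) hfind]
    have hm : (4 * q + 2) % 4 = 2 := by omega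
    have ht : ((pvTotalLen (4 * q + 2) + s : Nat) : Int) - ((2 * ((1 + q : Nat) : Int) - 1) ^ 2 - 1) = 2 * ((q : Int) + 1) + (s : Int) := by
      push_cast [hT]; ring
    rw [ht, hm, g2]
    rcases Nat.eq_zero_or_pos s with hs0 | hspos
    · subst hs0
      rw [if_pos (by push_cast; omega)]
      simp [pvDirV, List.cons.injEq]
      constructor <;> ring
    · rw [if_neg (by push_cast; omega), if_pos (by push_cast; omega)]
      simp [pvDirV, List.cons.injEq]
      constructor <;> ring
  · rw [show 4 * q + 1 + 2 = 4 * q + 3 from by omega] at hs h1 ⊢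
    -- c = 4q+3: down side, t = 4r+s
    have hlen : pvSegLen (4 * q + 3) = 2 * q + 2 := by unfold pvSegLen; omega
    have hT : pvTotalLen (4 * q + 3) = 4 * (q * q) + 8 * q + 4 := by
      have h4 := pvTotalLen_closed (4 * q + 3)
      have hr : (4 * q + 3) * (4 * q + 3) = 16 * (q * q) + 24 * q + 9 := by ring
      omega
    have hfind : pvFindR (pvTotalLen (4 * q + 3) + s) 1 = 1 + q := by
      apply pvFindR_spec
      · have hr : (2 * (1 + q) + 1) ^ 2 = 4 * (q * q) + 12 * q + 9 := by ring
        omega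
      · intro r' hr1 hr2
        refine Nat.lt_of_le_of_lt (Nat.sub_le_sub_right (Nat.pow_le_pow_left (show 2 * r' + 1 ≤ 2 * q + 1 by omega) 2) 1) ?_
        have hr : (2 * q + 1) ^ 2 = 4 * (q * q) + 4 * q + 1 := by ring
        omega
    rw [pvAlt_eval _ _ (by omega) hfind]
    have hm : (4 * q + 3) % 4 = 3 := by omega
    have ht : ((pvTotalLen (4 * q + 3) + s : Nat) : Int) - ((2 * ((1 + q : Nat) : Int) - 1) ^ 2 - 1) = 4 * ((q : Int) + 1) + (s : Int) := by
      push_cast [hT]; ring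
    rw [ht, hm, g3]
    rcases Nat.eq_zero_or_pos s with hs0 | hspos
    · subst hs0
      rw [if_neg (by push_cast; omega), if_pos (by push_cast; omega)]
      simp [pvDirV, List.cons.injEq]
      constructor <;> ring
    · rw [if_neg (by push_cast; omega), if_neg (by push_cast; omega),
        if_pos (by push_cast; omega)]
      simp [pvDirV, List.cons.injEq]
      constructor <;> ring
  · rw [show 4 * q + 1 + 3 = 4 * q + 4 from by omega] at hs h1 ⊢
    -- c = 4q+4: right side (bottom), t = 6r+s
    have hlen : pvSegLen (4 * q + 4) = 2 * q + 3 := by unfold pvSegLen; omega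
    have hT : pvTotalLen (4 * q + 4) = 4 * (q * q) + 10 * q + 6 := by
      have h4 := pvTotalLen_closed (4 * q + 4)
      have hr : (4 * q + 4) * (4 * q + 4) = 16 * (q * q) + 32 * q + 16 := by ring
      omega
    have hfind : pvFindR (pvTotalLen (4 * q + 4) + s) 1 = 1 + q := by
      apply pvFindR_spec
      · have hr : (2 * (1 + q) + 1) ^ 2 = 4 * (q * q) + 12 * q + 9 := by ring
        omega
      · intro r' hr1 hr2
        refine Nat.lt_of_le_of_lt (Nat.sub_le_sub_right (Nat.pow_le_pow_left (show 2 * r' + 1 ≤ 2 * q + 1 by omega) 2) 1) ?_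
        have hr : (2 * q + 1) ^ 2 = 4 * (q * q) + 4 * q + 1 := by ring
        omega
    rw [pvAlt_eval _ _ (by omega) hfind]
    have hm : (4 * q + 4) % 4 = 0 := by omega
    have ht : ((pvTotalLen (4 * q + 4) + s : Nat) : Int) - ((2 * ((1 + q : Nat) : Int) - 1) ^ 2 - 1) = 6 * ((q : Int) + 1) + (s : Int) := by
      push_cast [hT]; ring
    rw [ht, hm, g4]
    rcases Nat.eq_zero_or_pos s with hs0 | hspos
    · subst hs0
      rw [if_neg (by push_cast; omega), if_neg (by push_cast; omega),
        if_pos (by push_cast; omega)]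
      simp [pvDirV, List.cons.injEq]
      constructor <;> ring
    · rw [if_neg (by push_cast; omega), if_neg (by push_cast; omega),
        if_neg (by push_cast; omega)]
      simp [pvDirV, List.cons.injEq]
      constructor <;> ring

theorem pvFoldlConst (l : List Int) (st : Int × Int × (Int × Int) × Int × Int × Int × Int) :
    l.foldl (fun st _ => pvStepA st) st = pvStepA^[l.length] st := by
  induction l generalizing st with
  | nil => rfl
  | cons a l ih => simp [List.foldl_cons, ih, Function.iterate_succ_apply]

-- ===== VERDICT (by name: the statement is the Claim_ definition above) =====
theorem get_cartesian_coordinates_spec : Claim_equal_get_cartesian_coordinates := by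
  intro steps _
  unfold Spec_get_cartesian_coordinates get_cartesian_coordinates
  by_cases h : steps ≤ 1
  · rw [PySem.List.pyRange_one_eq_nil h]
    unfold get_cartesian_coordinates_alt
    rw [if_pos (by omega)]
    simp [pvDirAt]
  · replace h : 1 < steps := by omega
    set n : Nat := (steps - 1).toNat with hn
    have hsteps : steps = (n : Int) + 1 := by omega
    have hn1 : 1 ≤ n := by omega
    obtain ⟨c, s, hs, hdec⟩ := pvDecomp n
    rw [pvFoldlConst, PySem.List.length_pyRange_one]
    have hlen : (steps - 1).toNat = n := rfl
    rw [hlen, hdec, pvInvariant (pvTotalLen c + s) c s hs rfl]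
    have := pvAlt_link c s hs (by omega)
    rw [hsteps, hdec] at *
    rw [this]
    rfl
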